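-- pv_equiv track=rewrite | github.com/sl5581227-beep/brand-automation-ai-workflow | skills/script-writer/scripts/generate_storyboard.py | expand_prompt
-- ===== SOURCE A (Python) =====
-- def expand_prompt(prompt: str, min_words: int = 50) -> str:
--     """确保提示词≥50个词"""
--     words = prompt.split()
--     if len(words) >= min_words:
--         return prompt
--
--     # 扩充词汇
--     fillers = [
--         "professional photography", "high detail", "premium quality",
--         "cinematic rendering", "vibrant colors", "natural lighting",
--         "soft focus", "sharp details", "studio quality", "commercial grade"
--     ]
--
--     while len(words) < min_words:
--         words.extend(fillers[:min_words - len(words)])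
--
--     return " ".join(words)
-- ===== SOURCE B (Python) =====
-- def expand_prompt(prompt: str, min_words: int = 50) -> str:
--     """确保提示词≥50个词"""
--     words = prompt.split()
--     needed = min_words - len(words)
--     if needed <= 0:
--         return prompt
--     fillers = [
--         "professional photography", "high detail", "premium quality",
--         "cinematic rendering", "vibrant colors", "natural lighting",
--         "soft focus", "sharp details", "studio quality", "commercial grade"
--     ]
--     reps = -(-needed // len(fillers))
--     pad = (fillers * reps)[:needed]
--     return " ".join(words + pad)
-- ===== Notes on version B (the rewrite author's own statement) =====
-- stated objective: simpler
-- what changed: Replaces the while/extend/re-slice loop with a single up-front count (needed) and one cyclic fill built by list multiplication plus a slice.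
import Mathlib
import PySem

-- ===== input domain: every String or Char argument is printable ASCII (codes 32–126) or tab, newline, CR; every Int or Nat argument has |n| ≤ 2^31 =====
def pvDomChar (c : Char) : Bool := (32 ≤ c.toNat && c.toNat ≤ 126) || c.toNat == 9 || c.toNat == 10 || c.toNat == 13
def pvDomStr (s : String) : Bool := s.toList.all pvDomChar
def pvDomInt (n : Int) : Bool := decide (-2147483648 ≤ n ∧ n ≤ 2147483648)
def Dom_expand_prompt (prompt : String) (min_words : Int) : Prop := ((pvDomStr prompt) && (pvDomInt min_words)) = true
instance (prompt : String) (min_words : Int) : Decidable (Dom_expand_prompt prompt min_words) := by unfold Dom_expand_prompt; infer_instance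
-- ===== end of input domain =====

-- B replaces A's while/extend/re-slice padding loop with one up-front count and a
-- single cyclic fill (list multiplication + slice); same cost, simpler decomposition.


-- ===== PORT A =====
def pvFillersA : List String :=
  ["professional photography", "high detail", "premium quality",
   "cinematic rendering", "vibrant colors", "natural lighting",
   "soft focus", "sharp details", "studio quality", "commercial grade"]

-- the 'while len(words) < min_words: words.extend(fillers[:min_words - len(words)])' loop
def pvPadLoopA (words : List String) (min_words : Int) : List String :=
  if _ : (words.length : Int) < min_words then
    pvPadLoopA (words ++ PySem.List.slice pvFillersA none (some (min_words - words.length))) min_words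
  else words
termination_by (min_words - words.length).toNat
decreasing_by
  have hs := PySem.List.slice_to (xs := pvFillersA) (b := min_words - (words.length : Int)) (by omega)
  rw [hs]
  have hlen : 0 < (List.take (min_words - (words.length : Int)).toNat pvFillersA).length := by
    simp [pvFillersA]; omega
  simp only [List.length_append]
  omega

def expand_prompt (prompt : String) (min_words : Int) : String :=
  let words := PySem.Str.split₀ prompt
  if (words.length : Int) ≥ min_words then prompt
  else PySem.Str.join " " (pvPadLoopA words min_words)

-- ===== PORT B =====
def pvFillersB : List String :=
  ["professional photography", "high detail", "premium quality",
   "cinematic rendering", "vibrant colors", "natural lighting",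
   "soft focus", "sharp details", "studio quality", "commercial grade"]

def expand_prompt_alt (prompt : String) (min_words : Int) : String :=
  let words := PySem.Str.split₀ prompt
  let needed := min_words - words.length
  if needed ≤ 0 then prompt
  else
    -- reps = -(-needed // len(fillers)); pad = (fillers * reps)[:needed]
    let reps := -(PySem.Int.floordiv (-needed) pvFillersB.length)
    let pad := PySem.List.slice (PySem.List.pyRepeat pvFillersB reps) none (some needed)
    PySem.Str.join " " (words ++ pad)

-- ===== PRECONDITION & SPEC =====
def Spec_expand_prompt (prompt : String) (min_words : Int) (out : String) : Prop := out = expand_prompt_alt prompt min_words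
instance (prompt : String) (min_words : Int) (out : String) : Decidable (Spec_expand_prompt prompt min_words out) := by unfold Spec_expand_prompt; infer_instance

-- ===== CLAIM (what is proved, stated in full; the proofs are below) =====
def Claim_equal_expand_prompt : Prop := ∀ (prompt : String) (min_words : Int), Dom_expand_prompt prompt min_words → Spec_expand_prompt prompt min_words (expand_prompt prompt min_words)

-- ===== LEMMAS AND PROOFS =====

-- the padding both programs append: the first n items of the cycled filler list
def pvPadN (n : Nat) : List String :=
  (List.replicate ((n + 9) / 10) pvFillersA).flatten.take n

lemma pvPadN_big {n : Nat} (h : 10 ≤ n) :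
    pvPadN n = pvFillersA ++ pvPadN (n - 10) := by
  unfold pvPadN
  have hfa : pvFillersA.length = 10 := by simp [pvFillersA]
  have h9 : (n + 9) / 10 = (n - 10 + 9) / 10 + 1 := by omega
  rw [h9, List.replicate_succ, List.flatten_cons, List.take_append,
      List.take_of_length_le (by omega), hfa]

lemma pvPadLoopA_eq (n : Nat) : ∀ (words : List String) (m : Int),
    (m - words.length).toNat = n → (words.length : Int) < m →
    pvPadLoopA words m = words ++ pvPadN n := by
  induction n using Nat.strong_induction_on with
  | _ n ih =>
    intro words m hn hlt
    have hfa : pvFillersA.length = 10 := by simp [pvFillersA]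
    rw [pvPadLoopA.eq_def]
    simp only [hlt, dif_pos]
    have hs := PySem.List.slice_to (xs := pvFillersA) (b := m - (words.length : Int)) (by omega)
    rw [hs]
    by_cases hle : n ≤ 10
    · -- final round: the slice supplies everything still needed, the loop ends
      have htk : (List.take (m - (words.length : Int)).toNat pvFillersA).length = n := by
        rw [List.length_take, hfa]; omega
      rw [pvPadLoopA.eq_def]
      have hstop : ¬ (((words ++ List.take (m - (words.length : Int)).toNat pvFillersA).length : Int) < m) := by
        simp only [List.length_append, htk]; push_cast; omega
      rw [dif_neg hstop]
      congr 1
      unfold pvPadN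
      have h10 : (n + 9) / 10 = 1 := by omega
      rw [h10]
      simp only [List.replicate_one, List.flatten_cons, List.flatten_nil, List.append_nil]
      rw [hn]
    · -- a full copy of the fillers is appended, then the loop recurses
      have htk : List.take (m - (words.length : Int)).toNat pvFillersA = pvFillersA := by
        apply List.take_of_length_le
        rw [hfa]; omega
      rw [htk]
      have hrec := ih (n - 10) (by omega) (words ++ pvFillersA) m
        (by simp only [List.length_append, hfa]; omega)
        (by simp only [List.length_append, hfa]; push_cast; omega)
      rw [hrec, show pvPadN n = pvFillersA ++ pvPadN (n - 10) from pvPadN_big (by omega),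
          List.append_assoc]

lemma pvPadB_eq (needed : Int) (hpos : 0 < needed) :
    PySem.List.slice (PySem.List.pyRepeat pvFillersB (-(PySem.Int.floordiv (-needed) pvFillersB.length))) none (some needed)
      = pvPadN needed.toNat := by
  have hfb : pvFillersB.length = 10 := by simp [pvFillersB]
  have hq : -(PySem.Int.floordiv (-needed) (pvFillersB.length : Int)) = (((needed.toNat + 9) / 10 : Nat) : Int) := by
    rw [hfb]
    rw [PySem.Int.neg_floordiv_neg_eq_iff_of_pos (by norm_num)]
    refine ⟨by push_cast; omega, by push_cast; omega⟩
  rw [hq]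
  have hs := PySem.List.slice_to (xs := PySem.List.pyRepeat pvFillersB (((needed.toNat + 9) / 10 : Nat) : Int)) (b := needed) (by omega)
  rw [hs]
  unfold PySem.List.pyRepeat pvPadN
  rw [Int.toNat_natCast]
  rfl

theorem expand_prompt_spec : Claim_equal_expand_prompt := by
  unfold Claim_equal_expand_prompt Spec_expand_prompt expand_prompt expand_prompt_alt
  intro prompt min_words _
  set words := PySem.Str.split₀ prompt with hw
  by_cases h : (words.length : Int) ≥ min_words
  · simp only [h, if_pos]
    have : min_words - (words.length : Int) ≤ 0 := by omega
    simp [this]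
  · simp only [h]
    have hlt : (words.length : Int) < min_words := by omega
    have : ¬ (min_words - (words.length : Int) ≤ 0) := by omega
    simp only [this]
    rw [pvPadLoopA_eq (min_words - (words.length : Int)).toNat words min_words rfl hlt,
        pvPadB_eq _ (by omega)]
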